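-- pv_equiv track=rewrite | github.com/Souvik-Halder/Anamika_Java_Codes | Oops_Excalidraw/hi1.py | max_planks
-- ===== SOURCE A (Python) =====
-- from collections import Counter
--
-- def max_planks(wood):
--     length_count = Counter(wood)
--     max_count = 0
--     for target_length in length_count:
--         count = length_count[target_length]
--         used_pairs = set()
--         for length in length_count:
--             if length >= target_length:
--                 continue
--             needed_pair = target_length - length
--             if needed_pair in length_count:
--                 pair = tuple(sorted((length, needed_pair)))
--                 if pair not in used_pairs:
--                     pairs_to_add = min(length_count[length], length_count[needed_pair])
--                     count += pairs_to_add
--                     used_pairs.add(pair)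
--         max_count = max(max_count, count)
--     return max_count
-- ===== SOURCE B (Python) =====
-- from collections import Counter
--
-- def max_planks(wood):
--     cnt = Counter(wood)
--     ds = sorted(cnt)
--     best = 0
--     for target in cnt:
--         count = cnt[target]
--         l, r = 0, len(ds) - 1
--         while l <= r:
--             s = ds[l] + ds[r]
--             if s < target:
--                 l += 1
--             elif s > target:
--                 r -= 1
--             else:
--                 if ds[l] < target:
--                     count += cnt[ds[l]] if l == r else min(cnt[ds[l]], cnt[ds[r]])
--                 l += 1
--                 r -= 1
--         best = max(best, count)
--     return best
-- ===== Notes on version B (the rewrite author's own statement) =====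
-- stated objective: alternative
-- what changed: Per target, A scans all counter keys and deduplicates complement pairs with a hash set of sorted tuples; B instead sorts the distinct lengths once and finds all pairs summing to the target with a two-pointer sweep, so the used_pairs set and the per-key membership test disappear.
import Mathlib
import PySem

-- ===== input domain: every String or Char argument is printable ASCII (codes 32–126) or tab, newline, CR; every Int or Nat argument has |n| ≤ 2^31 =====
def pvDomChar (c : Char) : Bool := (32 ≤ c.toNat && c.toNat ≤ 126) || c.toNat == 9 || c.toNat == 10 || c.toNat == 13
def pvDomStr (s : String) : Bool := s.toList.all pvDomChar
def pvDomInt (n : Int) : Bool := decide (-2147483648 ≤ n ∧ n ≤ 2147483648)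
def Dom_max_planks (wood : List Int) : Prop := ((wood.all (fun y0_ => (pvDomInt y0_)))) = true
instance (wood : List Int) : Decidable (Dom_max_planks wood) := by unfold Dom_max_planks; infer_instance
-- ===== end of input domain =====

-- B replaces A's hash-membership inner scan with used-pair dedup by a sorted-distinct-lengths
-- two-pointer sweep per target (objective: alternative algorithm; same return value).

-- ===== PORT A =====
def max_planks (wood : List Int) : Int :=
  let lengthCount := PySem.Dict.counter wood
  lengthCount.keys.foldl (fun maxCount targetLength =>
    let st := lengthCount.keys.foldl (fun (st : Int × PySem.Set (Int × Int)) length =>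
      if length ≥ targetLength then st
      else
        let neededPair := targetLength - length
        if lengthCount.contains neededPair then
          let pair := if length ≤ neededPair then (length, neededPair) else (neededPair, length)
          if pair ∈ st.2 then st
          else (st.1 + min (lengthCount.getD length 0) (lengthCount.getD neededPair 0),
                PySem.Set.add st.2 pair)
        else st) (lengthCount.getD targetLength 0, PySem.Set.empty)
    max maxCount st.1) 0

-- ===== PORT B =====
-- the `while l <= r` two-pointer loop of Source B
def pvTwoPtr (cnt : PySem.Dict Int Int) (ds : List Int) (target l r c : Int) : Int :=
  if _h : l ≤ r then
    let s := PySem.List.pyGetD ds l 0 + PySem.List.pyGetD ds r 0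
    if s < target then pvTwoPtr cnt ds target (l + 1) r c
    else if target < s then pvTwoPtr cnt ds target l (r - 1) c
    else
      let c' := if PySem.List.pyGetD ds l 0 < target then
          c + (if l = r then cnt.getD (PySem.List.pyGetD ds l 0) 0
               else min (cnt.getD (PySem.List.pyGetD ds l 0) 0)
                        (cnt.getD (PySem.List.pyGetD ds r 0) 0))
        else c
      pvTwoPtr cnt ds target (l + 1) (r - 1) c'
  else c
termination_by (r + 1 - l).toNat
decreasing_by all_goals omega

def max_planks_alt (wood : List Int) : Int :=
  let cnt := PySem.Dict.counter wood
  let ds := PySem.List.sorted cnt.keys (fun x => x) false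
  cnt.keys.foldl (fun best target =>
    max best (pvTwoPtr cnt ds target 0 ((ds.length : Int) - 1) (cnt.getD target 0))) 0

-- ===== PRECONDITION & SPEC =====
def Spec_max_planks (wood : List Int) (out : Int) : Prop := out = max_planks_alt wood
instance (wood : List Int) (out : Int) : Decidable (Spec_max_planks wood out) := by unfold Spec_max_planks; infer_instance

-- ===== CLAIM (what is proved, stated in full; the proofs are below) =====
def Claim_equal_max_planks : Prop := ∀ (wood : List Int), Dom_max_planks wood → Spec_max_planks wood (max_planks wood)

-- ===== LEMMAS AND PROOFS =====

-- proof-side abbreviations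
def pvKeys (wood : List Int) : List Int := (PySem.Dict.counter wood).keys
def pvDs (wood : List Int) : List Int := PySem.List.sorted (PySem.Dict.counter wood).keys (fun x => x) false
def pvGetI (wood : List Int) (i : Int) : Int := PySem.List.pyGetD (pvDs wood) i 0
def pvContrib (wood : List Int) (q : Int × Int) : Int := min (wood.count q.1 : Int) (wood.count q.2 : Int)
def pvPairOf (t l : Int) : Int × Int := if l ≤ t - l then (l, t - l) else (t - l, l)
-- the set of unordered pairs A counts for a given target t (smaller component first)
def pvPairsT (wood : List Int) (t : Int) : Finset (Int × Int) :=
  (wood.toFinset ×ˢ wood.toFinset).filter (fun q => q.1 + q.2 = t ∧ q.1 ≤ q.2 ∧ q.1 < t)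
-- the pairs counted by the two-pointer window [l, r], as index pairs
noncomputable def pvWsum (wood : List Int) (t l r : Int) : Int :=
  ∑ q ∈ (Finset.Icc l r ×ˢ Finset.Icc l r).filter
      (fun q => q.1 ≤ q.2 ∧ pvGetI wood q.1 + pvGetI wood q.2 = t ∧ pvGetI wood q.1 < t),
    pvContrib wood (pvGetI wood q.1, pvGetI wood q.2)

-- A's per-target inner fold and B's per-target two-pointer value
def pvInnerA (wood : List Int) (t : Int) : Int :=
  ((PySem.Dict.counter wood).keys.foldl (fun (st : Int × PySem.Set (Int × Int)) length =>
      if length ≥ t then st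
      else
        let neededPair := t - length
        if (PySem.Dict.counter wood).contains neededPair then
          let pair := if length ≤ neededPair then (length, neededPair) else (neededPair, length)
          if pair ∈ st.2 then st
          else (st.1 + min ((PySem.Dict.counter wood).getD length 0) ((PySem.Dict.counter wood).getD neededPair 0),
                PySem.Set.add st.2 pair)
        else st) ((PySem.Dict.counter wood).getD t 0, PySem.Set.empty)).1
def pvTargetB (wood : List Int) (t : Int) : Int :=
  pvTwoPtr (PySem.Dict.counter wood) (pvDs wood) t 0 (((pvDs wood).length : Int) - 1)
    ((PySem.Dict.counter wood).getD t 0)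

-- membership / order facts about pvDs
lemma pvDs_pairwise (wood : List Int) : (pvDs wood).Pairwise (· < ·) := by
  unfold pvDs
  rw [PySem.Dict.keys_counter]
  exact PySem.List.sorted_ofList_pairwise_lt wood
lemma pvMem_ds (wood : List Int) (a : Int) : a ∈ pvDs wood ↔ a ∈ wood := by
  unfold pvDs
  rw [PySem.List.mem_sorted, PySem.Dict.keys_counter, PySem.Set.mem_ofList]
lemma pvGetI_lt (wood : List Int) {i j : Int} (h0 : 0 ≤ i) (hij : i < j)
    (hj : j < ((pvDs wood).length : Int)) : pvGetI wood i < pvGetI wood j := by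
  have hds := (List.pairwise_iff_getElem).mp (pvDs_pairwise wood)
  have hi : i.toNat < (pvDs wood).length := by omega
  have hj' : j.toNat < (pvDs wood).length := by omega
  unfold pvGetI
  rw [PySem.List.pyGetD_eq_getElem _ _ h0 (by omega),
      PySem.List.pyGetD_eq_getElem _ _ (by omega) hj]
  exact hds i.toNat j.toNat hi hj' (by omega)
lemma pvGetI_le (wood : List Int) {i j : Int} (h0 : 0 ≤ i) (hij : i ≤ j)
    (hj : j < ((pvDs wood).length : Int)) : pvGetI wood i ≤ pvGetI wood j := by
  rcases eq_or_lt_of_le hij with h | h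
  · rw [h]
  · exact le_of_lt (pvGetI_lt wood h0 h hj)
lemma pvGetI_inj (wood : List Int) {i j : Int} (hi0 : 0 ≤ i) (hi : i < ((pvDs wood).length : Int))
    (hj0 : 0 ≤ j) (hj : j < ((pvDs wood).length : Int)) (h : pvGetI wood i = pvGetI wood j) : i = j := by
  by_contra hne
  rcases lt_or_gt_of_ne hne with hlt | hlt
  · exact absurd h (ne_of_lt (pvGetI_lt wood hi0 hlt hj))
  · exact absurd h.symm (ne_of_lt (pvGetI_lt wood hj0 hlt hi))
lemma pvGetI_mem (wood : List Int) {i : Int} (h0 : 0 ≤ i) (hi : i < ((pvDs wood).length : Int)) :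
    pvGetI wood i ∈ wood := by
  unfold pvGetI
  rw [PySem.List.pyGetD_eq_getElem _ _ h0 hi]
  rw [← pvMem_ds wood]
  exact List.getElem_mem _
lemma pvMem_getI (wood : List Int) {a : Int} (ha : a ∈ wood) :
    ∃ i : Int, 0 ≤ i ∧ i < ((pvDs wood).length : Int) ∧ pvGetI wood i = a := by
  have : a ∈ pvDs wood := (pvMem_ds wood a).mpr ha
  rcases List.mem_iff_getElem.mp this with ⟨k, hk, hget⟩
  refine ⟨(k : Int), by omega, by exact_mod_cast hk, ?_⟩
  unfold pvGetI
  rw [PySem.List.pyGetD_eq_getElem _ _ (by omega) (by exact_mod_cast hk)]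
  simpa using hget

-- A side: the dedup fold sums contributions over the distinct pairs not already used
lemma pvInnerA_fold (wood : List Int) (t : Int) :
    ∀ (L : List Int) (c : Int) (used : PySem.Set (Int × Int)),
    (L.foldl (fun (st : Int × PySem.Set (Int × Int)) length =>
      if length ≥ t then st
      else
        let neededPair := t - length
        if (PySem.Dict.counter wood).contains neededPair then
          let pair := if length ≤ neededPair then (length, neededPair) else (neededPair, length)
          if pair ∈ st.2 then st
          else (st.1 + min ((PySem.Dict.counter wood).getD length 0) ((PySem.Dict.counter wood).getD neededPair 0),
                PySem.Set.add st.2 pair)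
        else st) (c, used)).1
    = c + ∑ q ∈ ((L.filter (fun l => decide (¬ l ≥ t) && (PySem.Dict.counter wood).contains (t - l))).toFinset.image (pvPairOf t) \ used.toFinset),
        pvContrib wood q := by
  intro L
  induction L with
  | nil => intro c used; simp
  | cons l L ih =>
    intro c used
    simp only [List.foldl_cons, List.filter_cons]
    by_cases h1 : l ≥ t
    · rw [if_pos h1]
      have hcond : (decide (¬ l ≥ t) && (PySem.Dict.counter wood).contains (t - l)) = false := by
        simp [h1]
      rw [hcond]
      simpa using ih c used
    · rw [if_neg h1]
      by_cases h2 : (PySem.Dict.counter wood).contains (t - l)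
      · have hcond : (decide (¬ l ≥ t) && (PySem.Dict.counter wood).contains (t - l)) = true := by
          simp [h1, h2]
        rw [hcond]
        simp only [h2, if_true]
        set p := (if l ≤ t - l then (l, t - l) else (t - l, l)) with hp
        have hpdef : p = pvPairOf t l := by rw [hp, pvPairOf]
        by_cases h3 : p ∈ used
        · rw [if_pos h3]
          rw [ih c used]
          rw [hpdef] at h3
          congr 1
          apply Finset.sum_congr _ (fun _ _ => rfl)
          rw [List.toFinset_cons, Finset.image_insert]
          exact (Finset.insert_sdiff_of_mem _ (List.mem_toFinset.mpr h3)).symm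
        · rw [if_neg h3]
          rw [ih _ _]
          rw [hpdef] at h3 ⊢
          have hm : min ((PySem.Dict.counter wood).getD l 0) ((PySem.Dict.counter wood).getD (t - l) 0)
              = pvContrib wood (pvPairOf t l) := by
            rw [PySem.Dict.getD_counter, PySem.Dict.getD_counter, pvContrib, pvPairOf]
            split
            · rfl
            · exact min_comm _ _
          have hadd : (PySem.Set.add used (pvPairOf t l)).toFinset = insert (pvPairOf t l) used.toFinset := by
            rw [PySem.Set.add_of_not_mem h3]
            ext q
            simp
          set S := ((L.filter fun l => decide (¬l ≥ t) && (PySem.Dict.counter wood).contains (t - l)).toFinset.image (pvPairOf t)) with hS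
          have h3' : pvPairOf t l ∉ used.toFinset := fun hc => h3 (List.mem_toFinset.mp hc)
          have hL : S \ (PySem.Set.add used (pvPairOf t l)).toFinset = (S \ used.toFinset).erase (pvPairOf t l) := by
            rw [hadd]; ext q; simp only [Finset.mem_sdiff, Finset.mem_insert, Finset.mem_erase]; tauto
          have hR : Finset.image (pvPairOf t) (List.toFinset (l :: (L.filter fun l => decide (¬l ≥ t) && (PySem.Dict.counter wood).contains (t - l)))) \ used.toFinset
              = insert (pvPairOf t l) (S \ used.toFinset) := by
            rw [List.toFinset_cons, Finset.image_insert, ← hS]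
            ext q; simp only [Finset.mem_sdiff, Finset.mem_insert]
            constructor
            · rintro ⟨hq | hq, hq2⟩
              · exact Or.inl hq
              · exact Or.inr ⟨hq, hq2⟩
            · rintro (hq | ⟨hq1, hq2⟩)
              · subst hq; exact ⟨Or.inl rfl, h3'⟩
              · exact ⟨Or.inr hq1, hq2⟩
          rw [hL, hR]
          have hins : insert (pvPairOf t l) (S \ used.toFinset) = insert (pvPairOf t l) ((S \ used.toFinset).erase (pvPairOf t l)) := by
            ext q; simp only [Finset.mem_insert, Finset.mem_erase]; tauto
          rw [hins, Finset.sum_insert (Finset.notMem_erase _ _), hm]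
          ring
      · have hcond : (decide (¬ l ≥ t) && (PySem.Dict.counter wood).contains (t - l)) = false := by
          simp [h2]
        rw [hcond]
        simp only [h2, if_false, Bool.false_eq_true]
        simpa using ih c used

lemma pvPairsA_eq (wood : List Int) (t : Int) :
    ((pvKeys wood).filter (fun l => decide (¬ l ≥ t) && (PySem.Dict.counter wood).contains (t - l))).toFinset.image (pvPairOf t)
      = pvPairsT wood t := by
  ext q
  simp only [Finset.mem_image, List.mem_toFinset, List.mem_filter, pvPairsT, Finset.mem_filter,
    Finset.mem_product, pvKeys, PySem.Dict.keys_counter, PySem.Set.mem_ofList, Bool.and_eq_true,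
    decide_eq_true_eq, PySem.Dict.contains_counter, List.contains_iff_mem]
  constructor
  · rintro ⟨l, ⟨hlmem, hlt, hneed⟩, rfl⟩
    rw [pvPairOf]
    split
    · exact ⟨⟨hlmem, hneed⟩, by omega, by omega, by omega⟩
    · exact ⟨⟨hneed, hlmem⟩, by omega, by omega, by omega⟩
  · rintro ⟨⟨ha, hb⟩, hsum, hle, hlt⟩
    refine ⟨q.1, ⟨ha, by omega, by rw [show t - q.1 = q.2 by omega]; exact hb⟩, ?_⟩
    rw [pvPairOf]
    rw [if_pos (by omega)]
    rw [show t - q.1 = q.2 by omega]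

lemma pvInnerA_eq (wood : List Int) (t : Int) :
    pvInnerA wood t = (wood.count t : Int) + ∑ q ∈ pvPairsT wood t, pvContrib wood q := by
  rw [pvInnerA, pvInnerA_fold wood t ((PySem.Dict.counter wood).keys) _ PySem.Set.empty]
  rw [PySem.Dict.getD_counter]
  congr 1
  have : (PySem.Set.empty : PySem.Set (Int × Int)).toFinset = ∅ := rfl
  rw [this, Finset.sdiff_empty]
  rw [show (PySem.Dict.counter wood).keys = pvKeys wood from rfl, pvPairsA_eq]

-- B side: the two-pointer loop sums the window pairs
lemma pvTwoPtr_eq (wood : List Int) (t : Int) :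
    ∀ (n : Nat) (l r c : Int), (r + 1 - l).toNat ≤ n → 0 ≤ l → r < ((pvDs wood).length : Int) →
    pvTwoPtr (PySem.Dict.counter wood) (pvDs wood) t l r c = c + pvWsum wood t l r := by
  have hg : ∀ i : Int, PySem.List.pyGetD (pvDs wood) i 0 = pvGetI wood i := fun _ => rfl
  intro n
  induction n with
  | zero =>
    intro l r c hn h0 hr
    have hlr : ¬ l ≤ r := by omega
    rw [pvTwoPtr, dif_neg hlr, pvWsum, Finset.Icc_eq_empty (show ¬ l ≤ r from hlr)]
    simp
  | succ n ih =>
    intro l r c hn h0 hr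
    by_cases hlr : l ≤ r
    · rw [pvTwoPtr, dif_pos hlr]
      simp only [hg]
      by_cases hst : pvGetI wood l + pvGetI wood r < t
      · rw [if_pos hst]
        rw [ih (l + 1) r c (by omega) (by omega) hr]
        congr 1
        rw [pvWsum, pvWsum]
        apply Finset.sum_congr _ (fun _ _ => rfl)
        ext q
        obtain ⟨i, j⟩ := q
        simp only [Finset.mem_filter, Finset.mem_product, Finset.mem_Icc]
        constructor
        · rintro ⟨⟨⟨h1, h2⟩, h3, h4⟩, h5, h6, h7⟩
          exact ⟨⟨⟨by omega, h2⟩, by omega, h4⟩, h5, h6, h7⟩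
        · rintro ⟨⟨⟨h1, h2⟩, h3, h4⟩, h5, h6, h7⟩
          have hiL : l + 1 ≤ i := by
            by_contra hc
            have hieq : i = l := by omega
            subst hieq
            have : pvGetI wood j ≤ pvGetI wood r := pvGetI_le wood (by omega) h4 hr
            omega
          exact ⟨⟨⟨hiL, h2⟩, by omega, h4⟩, h5, h6, h7⟩
      · by_cases hts : t < pvGetI wood l + pvGetI wood r
        · rw [if_neg hst, if_pos hts]
          rw [ih l (r - 1) c (by omega) h0 (by omega)]
          congr 1
          rw [pvWsum, pvWsum]
          apply Finset.sum_congr _ (fun _ _ => rfl)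
          ext q
          obtain ⟨i, j⟩ := q
          simp only [Finset.mem_filter, Finset.mem_product, Finset.mem_Icc]
          constructor
          · rintro ⟨⟨⟨h1, h2⟩, h3, h4⟩, h5, h6, h7⟩
            exact ⟨⟨⟨h1, by omega⟩, h3, by omega⟩, h5, h6, h7⟩
          · rintro ⟨⟨⟨h1, h2⟩, h3, h4⟩, h5, h6, h7⟩
            have hjR : j ≤ r - 1 := by
              by_contra hc
              have hjeq : j = r := by omega
              subst hjeq
              have : pvGetI wood l ≤ pvGetI wood i := pvGetI_le wood h0 h1 (by omega)
              omega
            exact ⟨⟨⟨h1, by omega⟩, h3, hjR⟩, h5, h6, h7⟩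
        · have hseq : pvGetI wood l + pvGetI wood r = t := by omega
          rw [if_neg hst, if_neg hts]
          rw [ih (l + 1) (r - 1) _ (by omega) (by omega) (by omega)]
          by_cases hguard : pvGetI wood l < t
          · rw [if_pos hguard]
            have hnotmem : ((l, r) : Int × Int) ∉ (Finset.Icc (l+1) (r-1) ×ˢ Finset.Icc (l+1) (r-1)).filter
                (fun q => q.1 ≤ q.2 ∧ pvGetI wood q.1 + pvGetI wood q.2 = t ∧ pvGetI wood q.1 < t) := by
              simp only [Finset.mem_filter, Finset.mem_product, Finset.mem_Icc]
              omega
            have hset : (Finset.Icc l r ×ˢ Finset.Icc l r).filter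
                  (fun q => q.1 ≤ q.2 ∧ pvGetI wood q.1 + pvGetI wood q.2 = t ∧ pvGetI wood q.1 < t)
                = insert ((l, r) : Int × Int) ((Finset.Icc (l+1) (r-1) ×ˢ Finset.Icc (l+1) (r-1)).filter
                  (fun q => q.1 ≤ q.2 ∧ pvGetI wood q.1 + pvGetI wood q.2 = t ∧ pvGetI wood q.1 < t)) := by
              ext q
              obtain ⟨i, j⟩ := q
              simp only [Finset.mem_filter, Finset.mem_product, Finset.mem_Icc, Finset.mem_insert,
                Prod.mk.injEq]
              constructor
              · rintro ⟨⟨⟨h1, h2⟩, h3, h4⟩, h5, h6, h7⟩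
                by_cases hc1 : i = l
                · subst hc1
                  have hjr : pvGetI wood j = pvGetI wood r := by omega
                  exact Or.inl ⟨rfl, pvGetI_inj wood (by omega) (by omega) (by omega) hr hjr⟩
                · have hjR : j ≤ r - 1 := by
                    by_contra hc
                    have hjeq : j = r := by omega
                    subst hjeq
                    have hil : pvGetI wood i = pvGetI wood l := by omega
                    exact hc1 (pvGetI_inj wood (by omega) (by omega) h0 (by omega) hil)
                  exact Or.inr ⟨⟨⟨by omega, by omega⟩, by omega, hjR⟩, h5, h6, h7⟩
              · rintro (⟨hq1, hq2⟩ | ⟨⟨⟨h1, h2⟩, h3, h4⟩, h5, h6, h7⟩)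
                · exact ⟨⟨⟨by omega, by omega⟩, by omega, by omega⟩, by omega,
                    by rw [hq1, hq2]; exact hseq, by rw [hq1]; exact hguard⟩
                · exact ⟨⟨⟨by omega, by omega⟩, by omega, by omega⟩, h5, h6, h7⟩
            have hX : pvContrib wood (pvGetI wood l, pvGetI wood r)
                = (if l = r then (PySem.Dict.counter wood).getD (pvGetI wood l) 0
                   else min ((PySem.Dict.counter wood).getD (pvGetI wood l) 0)
                            ((PySem.Dict.counter wood).getD (pvGetI wood r) 0)) := by
              rw [pvContrib, PySem.Dict.getD_counter, PySem.Dict.getD_counter]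
              by_cases hlr2 : l = r
              · subst hlr2; rw [if_pos rfl]; exact min_self _
              · rw [if_neg hlr2]
            rw [pvWsum, pvWsum, hset, Finset.sum_insert hnotmem, hX]
            ring
          · rw [if_neg hguard]
            congr 1
            rw [pvWsum, pvWsum]
            apply Finset.sum_congr _ (fun _ _ => rfl)
            ext q
            obtain ⟨i, j⟩ := q
            simp only [Finset.mem_filter, Finset.mem_product, Finset.mem_Icc]
            constructor
            · rintro ⟨⟨⟨h1, h2⟩, h3, h4⟩, h5, h6, h7⟩
              exact ⟨⟨⟨by omega, by omega⟩, by omega, by omega⟩, h5, h6, h7⟩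
            · rintro ⟨⟨⟨h1, h2⟩, h3, h4⟩, h5, h6, h7⟩
              have hiL : l + 1 ≤ i := by
                by_contra hc
                have : i = l := by omega
                subst this
                exact hguard h7
              have hjR : j ≤ r - 1 := by
                by_contra hc
                have hjeq : j = r := by omega
                subst hjeq
                have hil : pvGetI wood i = pvGetI wood l := by omega
                have : i = l := pvGetI_inj wood (by omega) (by omega) h0 (by omega) hil
                omega
              exact ⟨⟨⟨hiL, by omega⟩, by omega, hjR⟩, h5, h6, h7⟩
    · rw [pvTwoPtr, dif_neg hlr, pvWsum, Finset.Icc_eq_empty (show ¬ l ≤ r from hlr)]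
      simp

lemma pvWsum_full (wood : List Int) (t : Int) :
    pvWsum wood t 0 (((pvDs wood).length : Int) - 1) = ∑ q ∈ pvPairsT wood t, pvContrib wood q := by
  rw [pvWsum]
  refine Finset.sum_bij (fun q _ => (pvGetI wood q.1, pvGetI wood q.2)) ?_ ?_ ?_ ?_
  · rintro ⟨i, j⟩ hq
    simp only [Finset.mem_filter, Finset.mem_product, Finset.mem_Icc] at hq
    obtain ⟨⟨⟨h1, h2⟩, h3, h4⟩, h5, h6, h7⟩ := hq
    simp only [pvPairsT, Finset.mem_filter, Finset.mem_product, List.mem_toFinset]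
    exact ⟨⟨pvGetI_mem wood h1 (by omega), pvGetI_mem wood h3 (by omega)⟩, h6,
      pvGetI_le wood h1 h5 (by omega), h7⟩
  · rintro ⟨i, j⟩ hq ⟨i', j'⟩ hq' heq
    simp only [Finset.mem_filter, Finset.mem_product, Finset.mem_Icc] at hq hq'
    obtain ⟨⟨⟨h1, h2⟩, h3, h4⟩, h5, h6, h7⟩ := hq
    obtain ⟨⟨⟨g1, g2⟩, g3, g4⟩, g5, g6, g7⟩ := hq'
    simp only [Prod.mk.injEq] at heq ⊢
    exact ⟨pvGetI_inj wood h1 (by omega) g1 (by omega) heq.1,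
           pvGetI_inj wood h3 (by omega) g3 (by omega) heq.2⟩
  · rintro ⟨a, b⟩ hb
    simp only [pvPairsT, Finset.mem_filter, Finset.mem_product, List.mem_toFinset] at hb
    obtain ⟨⟨ha, hbb⟩, hsum, hle, hlt⟩ := hb
    obtain ⟨i, hi0, hilen, hia⟩ := pvMem_getI wood ha
    obtain ⟨j, hj0, hjlen, hjb⟩ := pvMem_getI wood hbb
    have hij : i ≤ j := by
      by_contra hc
      have : pvGetI wood j < pvGetI wood i := pvGetI_lt wood hj0 (by omega) hilen
      rw [hia, hjb] at this
      omega
    refine ⟨(i, j), ?_, ?_⟩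
    · simp only [Finset.mem_filter, Finset.mem_product, Finset.mem_Icc]
      exact ⟨⟨⟨hi0, by omega⟩, hj0, by omega⟩, hij,
        by rw [hia, hjb]; exact hsum, by rw [hia]; exact hlt⟩
    · simp [hia, hjb]
  · rintro ⟨i, j⟩ hq
    rfl

lemma pvTargetB_eq (wood : List Int) (t : Int) :
    pvTargetB wood t = (wood.count t : Int) + ∑ q ∈ pvPairsT wood t, pvContrib wood q := by
  rw [pvTargetB,
    pvTwoPtr_eq wood t ((((pvDs wood).length : Int) - 1 + 1 - 0).toNat) 0 _ _ (le_refl _)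
      (by omega) (by omega),
    PySem.Dict.getD_counter, pvWsum_full]

lemma pvFoldl_max_congr (L : List Int) (f g : Int → Int) (h : ∀ t, f t = g t) (a : Int) :
    L.foldl (fun m t => max m (f t)) a = L.foldl (fun m t => max m (g t)) a := by
  have : f = g := funext h
  rw [this]

-- ===== VERDICT (by name: the statement is the Claim_ definition above) =====
theorem max_planks_spec : Claim_equal_max_planks := by
  intro wood _
  show max_planks wood = max_planks_alt wood
  have hA : max_planks wood = (pvKeys wood).foldl (fun m t => max m (pvInnerA wood t)) 0 := rfl
  have hB : max_planks_alt wood = (pvKeys wood).foldl (fun m t => max m (pvTargetB wood t)) 0 := rfl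
  rw [hA, hB]
  exact pvFoldl_max_congr _ _ _ (fun t => by rw [pvInnerA_eq, pvTargetB_eq]) 0
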